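-- pv_equiv track=rewrite | github.com/IIpapuII/Edu_python | generadores/gen9.py | comparar_digitos
-- ===== SOURCE A (Python) =====
-- def comparar_digitos(rango):
--     num = 1
--     while num < rango:
--         dig1 = str(num)
--         dig1 = int(dig1[0])
--         dig2 = num % 10
--         if (dig1 == dig2):
--             yield num
--         num = num + 1
-- ===== SOURCE B (Python) =====
-- def comparar_digitos(rango):
--     # Constructive enumeration by digit length: no per-number string test.
--     p = 1  # 10 ** (length - 1)
--     while p < rango:
--         if p == 1:
--             d = 1
--             while d < 10 and d < rango:
--                 yield d
--                 d += 1
--         else: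
--             q = p // 10
--             d = 1
--             while d < 10 and d * p + d < rango:
--                 mid = 0
--                 while mid < q:
--                     num = d * p + mid * 10 + d
--                     if num >= rango:
--                         break
--                     yield num
--                     mid += 1
--                 d += 1
--         p *= 10
-- ===== Notes on version B (the rewrite author's own statement) =====
-- stated objective: faster
-- what changed: Instead of scanning every number below rango and testing first-vs-last digit via string conversion, B constructively enumerates the matching numbers block by digit length (first digit d, middle part mid, last digit d), stopping as soon as a block's smallest member reaches rango.
import Mathlib
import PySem

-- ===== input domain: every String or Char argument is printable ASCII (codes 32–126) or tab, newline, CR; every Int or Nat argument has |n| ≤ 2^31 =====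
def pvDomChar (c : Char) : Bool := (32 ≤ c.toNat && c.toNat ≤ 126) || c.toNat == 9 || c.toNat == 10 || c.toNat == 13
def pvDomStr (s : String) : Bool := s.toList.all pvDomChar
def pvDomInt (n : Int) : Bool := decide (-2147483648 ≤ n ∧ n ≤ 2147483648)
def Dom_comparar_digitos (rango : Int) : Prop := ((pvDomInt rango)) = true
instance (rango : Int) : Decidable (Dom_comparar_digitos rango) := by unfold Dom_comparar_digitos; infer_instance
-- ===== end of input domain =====

-- B replaces A's per-number first-vs-last-digit string test of every num < rango by a
-- constructive per-digit-length enumeration of the matching numbers (objective: faster).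
-- Both ports return the list of values the Python generator yields, in order.

-- ===== PORT A =====
-- dig1 = str(num); dig1 = int(dig1[0]) — the loop's num is always ≥ 1, so str(num) is
-- never empty and its first char is a digit: the `none`/getD fallbacks are unreachable.
def pvFirstDigitStr (num : Int) : Int :=
  match PySem.Str.pyGet? (PySem.Int.toStr num) 0 with
  | some c => (PySem.Int.ofStr? (String.ofList [c])).getD 0
  | none => 0

def pvALoop (rango num : Int) (acc : List Int) : List Int :=
  if _h : num < rango then
    let dig1 := pvFirstDigitStr num
    let dig2 := PySem.Int.mod num 10
    pvALoop rango (num + 1) (if dig1 = dig2 then acc ++ [num] else acc)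
  else acc
  termination_by (rango - num).toNat
  decreasing_by omega

def comparar_digitos (rango : Int) : List Int := pvALoop rango 1 []

-- ===== PORT B =====
-- while mid < q: num = d*p + mid*10 + d; break when num >= rango, else yield

def pvMidLoop (rango d p q mid : Int) : List Int :=
  if _h : mid < q then
    let num := d * p + mid * 10 + d
    if num < rango then num :: pvMidLoop rango d p q (mid + 1) else []
  else []
  termination_by (q - mid).toNat
  decreasing_by omega

-- while d < 10 and d*p + d < rango: inner mid loop; d += 1

def pvDLoop (rango p q d : Int) : List Int :=
  if _h : d < 10 then
    if d * p + d < rango then pvMidLoop rango d p q 0 ++ pvDLoop rango p q (d + 1) else []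
  else []
  termination_by (10 - d).toNat
  decreasing_by omega

-- while d < 10 and d < rango: yield d; d += 1   (single-digit block)

def pvOneLoop (rango d : Int) : List Int :=
  if _h : d < 10 then
    if d < rango then d :: pvOneLoop rango (d + 1) else []
  else []
  termination_by (10 - d).toNat
  decreasing_by omega

-- while p < rango: emit the block of numbers with 10^(L-1) = p; p *= 10

def pvLenLoop (rango p : Int) (hp : 0 < p) : List Int :=
  if _h : p < rango then
    (if p = 1 then pvOneLoop rango 1
     else pvDLoop rango p (PySem.Int.floordiv p 10) 1) ++
    pvLenLoop rango (10 * p) (by omega)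
  else []
  termination_by (rango - p).toNat
  decreasing_by omega

def comparar_digitos_alt (rango : Int) : List Int := pvLenLoop rango 1 one_pos

-- ===== PRECONDITION & SPEC =====
def Spec_comparar_digitos (rango : Int) (out : List Int) : Prop := out = comparar_digitos_alt rango
instance (rango : Int) (out : List Int) : Decidable (Spec_comparar_digitos rango out) := by unfold Spec_comparar_digitos; infer_instance

-- ===== CLAIM (what is proved, stated in full; the proofs are below) =====
def Claim_equal_comparar_digitos : Prop := ∀ (rango : Int), Dom_comparar_digitos rango → Spec_comparar_digitos rango (comparar_digitos rango)

-- ===== LEMMAS AND PROOFS =====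

-- leading decimal digit, numerically

def pvLead (n : Nat) : Nat :=
  if n < 10 then n else pvLead (n / 10)
  decreasing_by exact Nat.div_lt_self (by omega) (by omega)

theorem pvLead_eq (n : Nat) : pvLead n = if n < 10 then n else pvLead (n / 10) := by
  rw [pvLead]

-- the predicate both programs realize: first digit = last digit

def pvGood (n : Int) : Bool := decide ((pvLead n.toNat : Int) = PySem.Int.mod n 10)

theorem pvLead_bounds (n : Nat) (h : 1 ≤ n) : 1 ≤ pvLead n ∧ pvLead n < 10 := by
  induction n using Nat.strong_induction_on with
  | _ n ih =>
    rw [pvLead_eq]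
    split
    · omega
    · exact ih (n / 10) (by omega) (by omega)

theorem pvLead_decade (k : Nat) : ∀ (d n : Nat), 1 ≤ d → d ≤ 9 →
    d * 10 ^ k ≤ n → n < (d + 1) * 10 ^ k → pvLead n = d := by
  induction k with
  | zero =>
    intro d n h1 h9 hlo hhi
    simp only [pow_zero, mul_one] at hlo hhi
    rw [pvLead_eq, if_pos (by omega)]; omega
  | succ j ih =>
    intro d n h1 h9 hlo hhi
    have hP : 0 < 10 ^ j := pow_pos (by norm_num) j
    have hA : 0 < d * 10 ^ j := Nat.mul_pos h1 hP
    have e1 : d * 10 ^ (j + 1) = 10 * (d * 10 ^ j) := by ring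
    have e2 : (d + 1) * 10 ^ (j + 1) = 10 * ((d + 1) * 10 ^ j) := by ring
    rw [e1] at hlo; rw [e2] at hhi
    have hn10 : ¬ n < 10 := by omega
    rw [pvLead_eq, if_neg hn10]
    exact ih d (n / 10) h1 h9 (by omega) (by omega)

theorem pvToDigitsCore_head (f : Nat) : ∀ (n : Nat) (ds : List Char), 0 < f → n < 10 ^ f →
    ∃ r, Nat.toDigitsCore 10 f n ds = Nat.digitChar (pvLead n) :: r := by
  induction f with
  | zero => omega
  | succ f ih =>
    intro n ds _ hn
    simp only [Nat.toDigitsCore]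
    split
    · rename_i h0
      refine ⟨ds, ?_⟩
      have hn10 : n < 10 := by omega
      rw [pvLead_eq, if_pos hn10, Nat.mod_eq_of_lt hn10]
    · rename_i h0
      have hf : 0 < f := by
        rcases Nat.eq_zero_or_pos f with rfl | h
        · simp at hn; omega
        · exact h
      obtain ⟨r, hr⟩ := ih (n / 10) (Nat.digitChar (n % 10) :: ds) hf (by
        have : 10 ^ (f + 1) = 10 * 10 ^ f := by ring
        omega)
      refine ⟨r, ?_⟩
      rw [hr, show pvLead n = pvLead (n / 10) from by
        rw [pvLead_eq n, if_neg (by omega)]]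

theorem pvDigitVal (d : Nat) (h1 : 1 ≤ d) (h9 : d < 10) :
    (PySem.Int.ofStr? (String.ofList [Nat.digitChar d])).getD 0 = (d : Int) := by
  interval_cases d <;> decide

theorem pvFirstDigitStr_eq (num : Int) (h : 1 ≤ num) :
    pvFirstDigitStr num = (pvLead num.toNat : Int) := by
  have hm : 0 < num.toNat := by omega
  obtain ⟨r, hr⟩ := pvToDigitsCore_head (num.toNat + 1) num.toNat [] (by omega)
    (lt_of_lt_of_le (Nat.lt_pow_self (by norm_num)) (Nat.pow_le_pow_right (by norm_num) (by omega)))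
  have hchars : PySem.Int.toChars num = Nat.digitChar (pvLead num.toNat) :: r := by
    unfold PySem.Int.toChars
    rw [if_neg (by omega), Nat.toDigits, hr]
  have hb := pvLead_bounds num.toNat (by omega)
  unfold pvFirstDigitStr
  rw [show PySem.Str.pyGet? (PySem.Int.toStr num) 0
        = some (Nat.digitChar (pvLead num.toNat)) from by
    unfold PySem.Str.pyGet? PySem.Chars.pyGet? PySem.Int.toStr
    rw [String.toList_ofList, hchars]
    simp [pysem]]
  exact pvDigitVal _ hb.1 hb.2

theorem pvALoop_eq (rango : Int) : ∀ (num : Int) (acc : List Int), 1 ≤ num →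
    pvALoop rango num acc = acc ++ (PySem.List.pyRange num rango 1).filter pvGood := by
  intro num acc
  fun_induction pvALoop rango num acc with
  | case1 num acc h2 dig1 dig2 ih =>
    intro h
    have ih' := ih (by omega)
    simp only [dig1, dig2, pvFirstDigitStr_eq num h,
      PySem.Int.mod_eq_emod_of_pos (show (0:Int) < 10 by norm_num)] at ih' ⊢
    rw [PySem.List.pyRange_one_cons h2, List.filter_cons]
    by_cases hg : (pvLead num.toNat : Int) = num % 10
    · rw [if_pos hg]
      rw [dif_pos hg] at ih'
      rw [ih', show pvGood num = true from by simp [pvGood, hg]]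
      simp
    · rw [if_neg hg]
      rw [dif_neg hg] at ih'
      rw [ih', show pvGood num = false from by simp [pvGood, hg]]
      simp
  | case2 num acc h2 =>
    intro h
    rw [PySem.List.pyRange_one_eq_nil (by omega)]
    simp

theorem pvGood_iff (n : Int) : pvGood n = true ↔ (pvLead n.toNat : Int) = n % 10 := by
  simp [pvGood]

theorem pvGood_decade (j : Nat) (d n : Int) (hd1 : 1 ≤ d) (hd9 : d ≤ 9)
    (hlo : d * 10 ^ (j + 1) ≤ n) (hhi : n < (d + 1) * 10 ^ (j + 1)) :
    pvGood n = decide (n % 10 = d) := by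
  have hP : (0:Int) < 10 ^ (j + 1) := by positivity
  have hd0 : (0:Int) ≤ d := by omega
  have hn0 : (0:Int) ≤ n := le_trans (mul_nonneg hd0 (le_of_lt hP)) hlo
  have h1 : (d.toNat * 10 ^ (j + 1) : Nat) ≤ n.toNat := by
    have : ((d.toNat * 10 ^ (j + 1) : Nat) : Int) ≤ ((n.toNat : Nat) : Int) := by
      push_cast [Int.toNat_of_nonneg hd0, Int.toNat_of_nonneg hn0]; exact hlo
    exact_mod_cast this
  have h2 : n.toNat < ((d.toNat + 1) * 10 ^ (j + 1) : Nat) := by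
    have : ((n.toNat : Nat) : Int) < (((d.toNat + 1) * 10 ^ (j + 1) : Nat) : Int) := by
      push_cast [Int.toNat_of_nonneg hd0, Int.toNat_of_nonneg hn0]; exact hhi
    exact_mod_cast this
  have hlead := pvLead_decade (j + 1) d.toNat n.toNat (by omega) (by omega) h1 h2
  have hcast : (pvLead n.toNat : Int) = d := by rw [hlead]; exact Int.toNat_of_nonneg hd0
  simp only [pvGood, hcast, PySem.Int.mod_eq_emod_of_pos (show (0:Int) < 10 by norm_num)]
  rw [decide_eq_decide]
  exact eq_comm

-- filter of an interval contained in one 10-block [10t, 10t+10): picks X + d or nothing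

-- filter of an interval contained in one 10-block [10t, 10t+10): picks X + d or nothing

theorem pvFilter_block (X t d : Int) (hX : X = 10 * t) (hd1 : 1 ≤ d) (hd9 : d ≤ 9) :
    ∀ (b a : Int), X ≤ a → b ≤ X + 10 →
    (∀ n, a ≤ n → n < b → pvGood n = decide (n % 10 = d)) →
    (PySem.List.pyRange a b 1).filter pvGood =
      if a ≤ X + d ∧ X + d < b then [X + d] else [] := by
  intro b
  have : ∀ (m : Nat) (a : Int), (b - a).toNat = m → X ≤ a → b ≤ X + 10 →
      (∀ n, a ≤ n → n < b → pvGood n = decide (n % 10 = d)) →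
      (PySem.List.pyRange a b 1).filter pvGood =
        if a ≤ X + d ∧ X + d < b then [X + d] else [] := by
    intro m
    induction m with
    | zero =>
      intro a hm ha hb hg
      rw [PySem.List.pyRange_one_eq_nil (by omega)]
      rw [if_neg (by omega)]
      rfl
    | succ m ih =>
      intro a hm ha hb hg
      have hab : a < b := by omega
      rw [PySem.List.pyRange_one_cons hab, List.filter_cons]
      rw [hg a le_rfl hab]
      simp only [decide_eq_true_eq]
      by_cases he : a % 10 = d
      · have hae : a = X + d := by omega
        rw [if_pos he]
        rw [ih (a + 1) (by omega) (by omega) hb (fun n h1 h2 => hg n (by omega) h2)]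
        rw [if_neg (by omega), if_pos (by omega)]
        rw [hae]
      · have hane : a ≠ X + d := by omega
        rw [if_neg he]
        rw [ih (a + 1) (by omega) (by omega) hb (fun n h1 h2 => hg n (by omega) h2)]
        by_cases hc : a + 1 ≤ X + d ∧ X + d < b
        · rw [if_pos hc, if_pos (by omega)]
        · rw [if_neg hc, if_neg (by omega)]
  exact fun a => this (b - a).toNat a rfl

theorem pvMidLoop_eq (rango : Int) (j : Nat) (d : Int) (hd1 : 1 ≤ d) (hd9 : d ≤ 9) :
    ∀ (mid : Int), 0 ≤ mid →
    pvMidLoop rango d (10 ^ (j + 1)) (10 ^ j) mid =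
      (PySem.List.pyRange (d * 10 ^ (j + 1) + mid * 10)
        (min rango ((d + 1) * 10 ^ (j + 1))) 1).filter pvGood := by
  intro mid
  fun_induction pvMidLoop rango d (10 ^ (j + 1)) (10 ^ j) mid with
  | case1 mid hlt num hnum ih =>
    intro hm0
    have hQ : (0:Int) < 10 ^ j := by positivity
    have e1 : d * 10 ^ (j + 1) = 10 * (d * 10 ^ j) := by ring
    have e2 : (d + 1) * 10 ^ (j + 1) = 10 * (d * 10 ^ j) + 10 * 10 ^ j := by ring
    have hX : d * 10 ^ (j + 1) + mid * 10 = 10 * (d * 10 ^ j + mid) := by ring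
    simp only [num] at hnum ⊢
    have hM1 : min rango ((d + 1) * 10 ^ (j + 1)) ≤ rango := min_le_left _ _
    have hM2 : min rango ((d + 1) * 10 ^ (j + 1)) ≤ (d + 1) * 10 ^ (j + 1) := min_le_right _ _
    have hM3 := min_choice rango ((d + 1) * 10 ^ (j + 1))
    have hm1 : min rango (d * 10 ^ (j + 1) + mid * 10 + 10) ≤ rango := min_le_left _ _
    have hm2 : min rango (d * 10 ^ (j + 1) + mid * 10 + 10)
        ≤ d * 10 ^ (j + 1) + mid * 10 + 10 := min_le_right _ _
    have hm3 := min_choice rango (d * 10 ^ (j + 1) + mid * 10 + 10)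
    rw [ih (by omega)]
    rw [PySem.List.pyRange_one_append (d * 10 ^ (j + 1) + mid * 10)
          (min rango (d * 10 ^ (j + 1) + mid * 10 + 10))
          (min rango ((d + 1) * 10 ^ (j + 1))) (by omega) (by omega),
        List.filter_append]
    rw [pvFilter_block (d * 10 ^ (j + 1) + mid * 10) (d * 10 ^ j + mid) d hX hd1 hd9
          _ _ le_rfl (by omega)
          (fun n h1 h2 => pvGood_decade j d n hd1 hd9 (by omega) (by omega))]
    rw [if_pos (by omega)]
    rw [show d * 10 ^ (j + 1) + (mid + 1) * 10 = d * 10 ^ (j + 1) + mid * 10 + 10 by ring]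
    by_cases hca : rango ≤ d * 10 ^ (j + 1) + mid * 10 + 10
    · -- both tail ranges are empty
      rw [PySem.List.pyRange_one_eq_nil (by omega),
          PySem.List.pyRange_one_eq_nil (by omega)]
      simp
    · rw [show min rango (d * 10 ^ (j + 1) + mid * 10 + 10)
            = d * 10 ^ (j + 1) + mid * 10 + 10 by omega]
      simp
  | case2 mid hlt num hnum =>
    intro hm0
    have hQ : (0:Int) < 10 ^ j := by positivity
    have e1 : d * 10 ^ (j + 1) = 10 * (d * 10 ^ j) := by ring
    have e2 : (d + 1) * 10 ^ (j + 1) = 10 * (d * 10 ^ j) + 10 * 10 ^ j := by ring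
    have hX : d * 10 ^ (j + 1) + mid * 10 = 10 * (d * 10 ^ j + mid) := by ring
    simp only [num] at hnum
    have hM1 : min rango ((d + 1) * 10 ^ (j + 1)) ≤ rango := min_le_left _ _
    have hM2 : min rango ((d + 1) * 10 ^ (j + 1)) ≤ (d + 1) * 10 ^ (j + 1) := min_le_right _ _
    rw [pvFilter_block (d * 10 ^ (j + 1) + mid * 10) (d * 10 ^ j + mid) d hX hd1 hd9
          _ _ le_rfl (by omega)
          (fun n h1 h2 => pvGood_decade j d n hd1 hd9 (by omega) (by omega))]
    rw [if_neg (by omega)]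
  | case3 mid hge =>
    intro hm0
    have hQ : (0:Int) < 10 ^ j := by positivity
    have e1 : d * 10 ^ (j + 1) = 10 * (d * 10 ^ j) := by ring
    have e2 : (d + 1) * 10 ^ (j + 1) = 10 * (d * 10 ^ j) + 10 * 10 ^ j := by ring
    have hM2 : min rango ((d + 1) * 10 ^ (j + 1)) ≤ (d + 1) * 10 ^ (j + 1) := min_le_right _ _
    rw [PySem.List.pyRange_one_eq_nil (by omega)]
    rfl

theorem pvOneLoop_eq (rango : Int) : ∀ (d : Int), 1 ≤ d →
    pvOneLoop rango d = (PySem.List.pyRange d (min rango 10) 1).filter pvGood := by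
  intro d
  fun_induction pvOneLoop rango d with
  | case1 d h10 hr ih =>
    intro h1
    rw [ih (by omega)]
    rw [PySem.List.pyRange_one_cons (by omega : d < min rango 10), List.filter_cons]
    rw [show pvGood d = true from by
      rw [pvGood_iff, pvLead_eq, if_pos (by omega)]
      push_cast [Int.toNat_of_nonneg (by omega : (0:Int) ≤ d)]
      omega]
    rfl
  | case2 d h10 hr =>
    intro h1
    rw [PySem.List.pyRange_one_eq_nil (by omega)]
    rfl
  | case3 d h10 =>
    intro h1
    rw [PySem.List.pyRange_one_eq_nil (by omega)]
    rfl

theorem pvDLoop_eq (rango : Int) (j : Nat) : ∀ (d : Int), 1 ≤ d → d ≤ 10 →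
    pvDLoop rango (10 ^ (j + 1)) (10 ^ j) d =
      (PySem.List.pyRange (d * 10 ^ (j + 1)) (min rango (10 * 10 ^ (j + 1))) 1).filter pvGood := by
  intro d
  fun_induction pvDLoop rango (10 ^ (j + 1)) (10 ^ j) d with
  | case1 d h10 hbase ih =>
    intro hd1 hd10
    have hQ : (0:Int) < 10 ^ j := by positivity
    have e1 : d * 10 ^ (j + 1) = 10 * (d * 10 ^ j) := by ring
    have e2 : (d + 1) * 10 ^ (j + 1) = 10 * (d * 10 ^ j) + 10 * 10 ^ j := by ring
    have e3 : 10 * 10 ^ (j + 1) = 10 * (10 * 10 ^ j) := by ring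
    have e4 : d * 10 ^ j ≤ 9 * 10 ^ j := mul_le_mul_of_nonneg_right (by omega) (le_of_lt hQ)
    rw [ih (by omega) (by omega)]
    rw [pvMidLoop_eq rango j d (by omega) (by omega) 0 le_rfl]
    rw [PySem.List.pyRange_one_append (d * 10 ^ (j + 1))
          (min rango ((d + 1) * 10 ^ (j + 1)))
          (min rango (10 * 10 ^ (j + 1)))
          (le_min (by omega) (by omega)) (min_le_min le_rfl (by omega)),
        List.filter_append]
    simp only [zero_mul, add_zero]
    by_cases hca : rango ≤ (d + 1) * 10 ^ (j + 1)
    · rw [min_eq_left hca]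
      rw [PySem.List.pyRange_one_eq_nil (min_le_left _ _),
          PySem.List.pyRange_one_eq_nil (le_trans (min_le_left _ _) hca)]
    · rw [min_eq_right (by omega)]
  | case2 d h10 hbase =>
    intro hd1 hd10
    have hQ : (0:Int) < 10 ^ j := by positivity
    have e1 : d * 10 ^ (j + 1) = 10 * (d * 10 ^ j) := by ring
    have e2 : (d + 1) * 10 ^ (j + 1) = 10 * (d * 10 ^ j) + 10 * 10 ^ j := by ring
    rw [pvFilter_block (d * 10 ^ (j + 1)) (d * 10 ^ j) d e1 (by omega) (by omega)
          _ _ le_rfl (le_trans (min_le_left _ _) (by omega))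
          (fun n h1 h2 => by
            have h2' : n < rango := lt_of_lt_of_le h2 (min_le_left _ _)
            exact pvGood_decade j d n (by omega) (by omega) (by omega) (by omega))]
    rw [if_neg (fun hc => absurd (lt_of_lt_of_le hc.2 (min_le_left _ _)) (by omega))]
  | case3 d h10 =>
    intro hd1 hd10
    have hd : d = 10 := by omega
    subst hd
    rw [PySem.List.pyRange_one_eq_nil (min_le_right _ _)]
    rfl

theorem pvLenLoop_eq (rango : Int) : ∀ (p : Int) (hp : 0 < p), (∃ k : Nat, p = 10 ^ k) →
    pvLenLoop rango p hp = (PySem.List.pyRange p rango 1).filter pvGood := by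
  intro p hp
  fun_induction pvLenLoop rango p hp with
  | case1 p hp hlt ih =>
    intro ⟨k, hk⟩
    have hblk : (if p = 1 then pvOneLoop rango 1
        else pvDLoop rango p (PySem.Int.floordiv p 10) 1) =
        (PySem.List.pyRange p (min rango (10 * p)) 1).filter pvGood := by
      cases k with
      | zero =>
        simp only [pow_zero] at hk
        subst hk
        rw [if_pos rfl, pvOneLoop_eq rango 1 le_rfl]
        norm_num
      | succ j =>
        subst hk
        have hQ : (0:Int) < 10 ^ j := by positivity
        rw [if_neg (by
          have : (10:Int) ^ (j + 1) = 10 * 10 ^ j := by ring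
          omega)]
        rw [show PySem.Int.floordiv (10 ^ (j + 1)) 10 = (10:Int) ^ j from by
          rw [PySem.Int.floordiv_eq_ediv_of_pos (by norm_num), pow_succ]
          exact Int.mul_ediv_cancel _ (by norm_num)]
        have := pvDLoop_eq rango j 1 le_rfl (by norm_num)
        rw [this, one_mul]
    rw [hblk, ih ⟨k + 1, by rw [hk]; ring⟩]
    rw [PySem.List.pyRange_one_append p (min rango (10 * p)) rango
          (le_min (by omega) (by omega)) (min_le_left _ _),
        List.filter_append]
    by_cases hca : rango ≤ 10 * p
    · rw [min_eq_left hca]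
      rw [PySem.List.pyRange_one_eq_nil le_rfl,
          PySem.List.pyRange_one_eq_nil hca]
    · rw [min_eq_right (by omega)]
  | case2 p hp hge =>
    intro _
    rw [PySem.List.pyRange_one_eq_nil (by omega)]
    rfl

-- ===== VERDICT (by name: the statement is the Claim_ definition above) =====
theorem comparar_digitos_spec : Claim_equal_comparar_digitos := by
  intro rango _
  unfold Spec_comparar_digitos comparar_digitos comparar_digitos_alt
  rw [pvALoop_eq rango 1 [] (by omega), pvLenLoop_eq rango 1 one_pos ⟨0, by norm_num⟩]
  simp
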